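-- pv_equiv track=rewrite | github.com/michalsr/gpv | exp/ours/rl_experiment/data_loading.py | _expand_templates
-- ===== SOURCE A (Python) =====
-- SUBSTITUIONS = {
--   "DT_OBJ": [
--     "this object", "this entity", "this thing",
--     "the object", "the entity",
--     "that object", "that entity",  "that thing"
--   ],
--   "DT": ["the", "this", "that"],
--   "OBJ": ['object', 'entity'],
--   "CMD": ["Describe", "State", "Specify", "Name"],
--   "NAME": ["Describe", "Specify", "Name", "Classify"],
--   "CAP": ["Describe", "Caption", "Generate a caption for"],
--   "WH": ["What", "Which"]
-- }
--
-- def _expand_templates(templates):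
--   for (prefix, subs) in SUBSTITUIONS.items():
--     out = []
--     for template in templates:
--       if prefix in template:
--         for sub in subs:
--           out.append(template.replace(prefix, sub))
--       else:
--         out.append(template)
--     templates = out
--   return templates
-- ===== SOURCE B (Python) =====
-- SUBSTITUIONS = {
--   "DT_OBJ": [
--     "this object", "this entity", "this thing",
--     "the object", "the entity",
--     "that object", "that entity",  "that thing"
--   ],
--   "DT": ["the", "this", "that"],
--   "OBJ": ['object', 'entity'],
--   "CMD": ["Describe", "State", "Specify", "Name"],
--   "NAME": ["Describe", "Specify", "Name", "Classify"],
--   "CAP": ["Describe", "Caption", "Generate a caption for"],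
--   "WH": ["What", "Which"]
-- }
--
-- def _expand_one(s, subs_list):
--   """Depth-first recursive expansion of one string over the remaining keys."""
--   if not subs_list:
--     return [s]
--   (prefix, options) = subs_list[0]
--   rest = subs_list[1:]
--   if prefix in s:
--     return [r for opt in options for r in _expand_one(s.replace(prefix, opt), rest)]
--   return _expand_one(s, rest)
--
-- def _expand_templates(templates):
--   keys = list(SUBSTITUIONS.items())
--   return [r for t in templates for r in _expand_one(t, keys)]
-- ===== Notes on version B (the rewrite author's own statement) =====
-- stated objective: alternative
-- what changed: Replaces A's staged breadth passes (one full rebuilt list per substitution key) with a depth-first recursion on the key list that fully expands each template string on its own, emitting final strings directly and never materialising any intermediate whole-population list.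
import Mathlib
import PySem

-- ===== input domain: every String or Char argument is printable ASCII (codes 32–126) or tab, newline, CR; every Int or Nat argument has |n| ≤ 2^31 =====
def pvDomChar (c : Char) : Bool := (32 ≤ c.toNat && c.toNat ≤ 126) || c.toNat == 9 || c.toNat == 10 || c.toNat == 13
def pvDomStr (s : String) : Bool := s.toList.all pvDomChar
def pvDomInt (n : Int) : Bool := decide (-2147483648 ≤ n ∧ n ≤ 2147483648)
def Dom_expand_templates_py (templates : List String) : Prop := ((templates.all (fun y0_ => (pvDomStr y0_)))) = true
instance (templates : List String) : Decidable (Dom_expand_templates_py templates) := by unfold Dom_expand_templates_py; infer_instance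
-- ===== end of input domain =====

-- B replaces A's staged per-key rebuilds of the whole list with a depth-first recursion
-- on the key list, fully expanding each template on its own; alternative decomposition, same result.

-- the module constant SUBSTITUIONS (a dict iterated in insertion order), shared by both ports
def pvSubs : List (String × List String) :=
  [("DT_OBJ", ["this object", "this entity", "this thing",
               "the object", "the entity",
               "that object", "that entity", "that thing"]),
   ("DT", ["the", "this", "that"]),
   ("OBJ", ["object", "entity"]),
   ("CMD", ["Describe", "State", "Specify", "Name"]),
   ("NAME", ["Describe", "Specify", "Name", "Classify"]),
   ("CAP", ["Describe", "Caption", "Generate a caption for"]),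
   ("WH", ["What", "Which"])]

-- ===== PORT A =====
-- for each key: rebuild the whole template list, expanding matching templates
def expand_templates_py (templates : List String) : List String :=
  pvSubs.foldl (fun templates ps =>
    templates.foldl (fun out template =>
      if PySem.Str.isIn ps.1 template then
        ps.2.foldl (fun out sub => out ++ [PySem.Str.replace template ps.1 sub]) out
      else
        out ++ [template]) []) templates

-- ===== PORT B =====
-- depth-first recursive expansion of one string over the remaining key list (Source B's _expand_one)
def pvExpandOne (s : String) : List (String × List String) → List String
  | [] => [s]
  | ps :: rest =>
      if PySem.Str.isIn ps.1 s then
        ps.2.flatMap (fun opt => pvExpandOne (PySem.Str.replace s ps.1 opt) rest)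
      else
        pvExpandOne s rest

-- each template is expanded fully on its own, results emitted directly
def expand_templates_py_alt (templates : List String) : List String :=
  templates.flatMap (fun t => pvExpandOne t pvSubs)

-- ===== PRECONDITION & SPEC =====
def Spec_expand_templates_py (templates : List String) (out : List String) : Prop := out = expand_templates_py_alt templates
instance (templates : List String) (out : List String) : Decidable (Spec_expand_templates_py templates out) := by unfold Spec_expand_templates_py; infer_instance

-- ===== CLAIM (what is proved, stated in full; the proofs are below) =====
def Claim_equal_expand_templates_py : Prop := ∀ (templates : List String), Dom_expand_templates_py templates → Spec_expand_templates_py templates (expand_templates_py templates)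

-- ===== LEMMAS AND PROOFS =====

-- proof-only abbreviation: the one-string expansion under a single key
def pvStep (ps : String × List String) (s : String) : List String :=
  if PySem.Str.isIn ps.1 s then ps.2.map (fun sub => PySem.Str.replace s ps.1 sub) else [s]

-- A's per-key inner loop is a flatMap of the one-string step
lemma stepA_eq_flatMap (ts : List String) (ps : String × List String) :
    ts.foldl (fun out template =>
      if PySem.Str.isIn ps.1 template then
        ps.2.foldl (fun out sub => out ++ [PySem.Str.replace template ps.1 sub]) out
      else out ++ [template]) [] = ts.flatMap (pvStep ps) := by
  have h : ∀ t out, (if PySem.Str.isIn ps.1 t then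
        ps.2.foldl (fun out sub => out ++ [PySem.Str.replace t ps.1 sub]) out
      else out ++ [t]) = out ++ pvStep ps t := by
    intro t out
    unfold pvStep
    split_ifs with hc
    · rw [PySem.List.foldl_append_singleton_eq_map]
    · rfl
  rw [show (fun (out : List String) template =>
      if PySem.Str.isIn ps.1 template then
        ps.2.foldl (fun out sub => out ++ [PySem.Str.replace template ps.1 sub]) out
      else out ++ [template]) = fun out t => out ++ pvStep ps t from by
    funext out t; exact h t out]
  simpa using PySem.List.foldl_append_eq_flatMap (pvStep ps) ts []

-- sequential per-key flatMap over the whole list equals depth-first expansion per string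
lemma fold_eq_dfs (keys : List (String × List String)) :
    ∀ ts : List String,
      keys.foldl (fun ts ps => ts.flatMap (pvStep ps)) ts
        = ts.flatMap (fun t => pvExpandOne t keys) := by
  induction keys with
  | nil => intro ts; simp [pvExpandOne]
  | cons p rest ih =>
    intro ts
    simp only [List.foldl_cons]
    rw [ih (ts.flatMap (pvStep p)), List.flatMap_assoc]
    congr 1
    funext t
    show (pvStep p t).flatMap (fun s => pvExpandOne s rest) = pvExpandOne t (p :: rest)
    simp only [pvStep]
    split_ifs with hc
    · simp only [pvExpandOne, hc, if_true, List.flatMap_map]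
    · simp only [pvExpandOne, hc]
      simp

-- ===== VERDICT (by name: the statement is the Claim_ definition above) =====
theorem expand_templates_py_spec : Claim_equal_expand_templates_py := by
  intro templates _
  unfold Spec_expand_templates_py expand_templates_py expand_templates_py_alt
  rw [show (fun (templates : List String) (ps : String × List String) =>
      templates.foldl (fun out template =>
        if PySem.Str.isIn ps.1 template then
          ps.2.foldl (fun out sub => out ++ [PySem.Str.replace template ps.1 sub]) out
        else out ++ [template]) []) = fun ts ps => ts.flatMap (pvStep ps) from by
    funext ts ps; exact stepA_eq_flatMap ts ps]
  exact fold_eq_dfs pvSubs templates
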